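-- pv_equiv track=rewrite | github.com/MBDev-LS/cs | project-euler/problem31.py | getCoinCombos
-- ===== SOURCE A (Python) =====
-- COINS = [1, 2, 5, 10, 20, 50, 100, 200]
--
-- def getCoinCombos(target: int, targetCache: dict=None):
--
-- 	combos = []
-- 	targetCache = {} if targetCache is None else targetCache
--
-- 	for coin in COINS:
-- 		times = target // coin
-- 		remainder = target - coin
--
-- 		if times < 1:
-- 			continue
--
-- 		if remainder == 0:
-- 			combos.append([coin])
-- 			continue
--
-- 		remainderCombos = getCoinCombos(remainder, targetCache) if remainder not in targetCache else targetCache[remainder]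
-- 		targetCache[remainder] = remainderCombos
--
-- 		for remCombo in remainderCombos:
-- 			combos.append([coin] + remCombo)
--
-- 	return combos
-- ===== SOURCE B (Python) =====
-- COINS = [1, 2, 5, 10, 20, 50, 100, 200]
--
-- def _row(t, cache):
-- 	# one row of the DP table: all ordered combos summing to t, coin-ascending
-- 	combos = []
-- 	for coin in COINS:
-- 		if coin > t:
-- 			break
-- 		if coin == t:
-- 			combos.append([coin])
-- 		else:
-- 			combos.extend([coin] + r for r in cache[t - coin])
-- 	return combos
--
-- def getCoinCombos(target: int, targetCache: dict=None):
-- 	cache = {} if targetCache is None else targetCache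
-- 	for t in range(1, target):
-- 		if t not in cache:
-- 			cache[t] = _row(t, cache)
-- 	return _row(target, cache)
-- ===== Notes on version B (the rewrite author's own statement) =====
-- stated objective: alternative
-- what changed: Replaced A's top-down memoized recursion over remainders by a bottom-up dynamic-programming loop that fills the cache table for t = 1 .. target-1 ascending and then assembles the final row, keeping the identical coin-ascending combination order.
import Mathlib
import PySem

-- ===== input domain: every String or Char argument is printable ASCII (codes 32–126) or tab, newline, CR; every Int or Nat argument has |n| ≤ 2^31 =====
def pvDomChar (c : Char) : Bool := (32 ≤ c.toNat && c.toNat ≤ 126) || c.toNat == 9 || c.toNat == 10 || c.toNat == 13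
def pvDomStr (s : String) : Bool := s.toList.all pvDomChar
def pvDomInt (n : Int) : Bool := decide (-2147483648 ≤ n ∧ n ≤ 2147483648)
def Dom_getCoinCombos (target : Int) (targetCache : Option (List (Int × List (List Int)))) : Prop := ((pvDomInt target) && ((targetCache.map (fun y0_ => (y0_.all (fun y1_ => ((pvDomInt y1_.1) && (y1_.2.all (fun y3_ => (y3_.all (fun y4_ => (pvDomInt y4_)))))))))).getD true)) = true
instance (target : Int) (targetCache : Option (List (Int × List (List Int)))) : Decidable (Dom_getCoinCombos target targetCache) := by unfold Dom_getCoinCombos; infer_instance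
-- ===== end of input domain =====

-- B replaces A's top-down memoized recursion by a bottom-up DP table filled t = 1 .. target-1 (alternative
-- decomposition, same cost); both versions mutate the passed cache dict, the equivalence is about the RETURN value.

-- ===== PORT A =====
def pvCOINS : List Int := [1, 2, 5, 10, 20, 50, 100, 200]

-- termination helper for the ports' recursion (cited by decreasing_by)
theorem pvCoin_le_of_floordiv {t c : Int} (hc : 1 ≤ c) (h : ¬ PySem.Int.floordiv t c < 1) : c ≤ t := by
  have h2 : (1 : Int) * c ≤ t :=
    (PySem.Int.le_floordiv_iff_mul_le (by omega)).mp (by omega)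
  omega

mutual
-- the 'for coin in COINS' loop of A: state = (combos, cache); the hc argument is a termination device only
def pvALoop (target : Int) (coins : List Int) (hc : ∀ c ∈ coins, 1 ≤ c)
    (combos : List (List Int)) (cache : PySem.Dict Int (List (List Int))) :
    List (List Int) × PySem.Dict Int (List (List Int)) :=
  match coins, hc with
  | [], _ => (combos, cache)
  | coin :: rest, hc =>
    if h1 : PySem.Int.floordiv target coin < 1 then
      pvALoop target rest (fun c h => hc c (List.mem_cons_of_mem _ h)) combos cache
    else if h2 : target - coin = 0 then
      pvALoop target rest (fun c h => hc c (List.mem_cons_of_mem _ h)) (combos ++ [[coin]]) cache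
    else
      let rc : List (List Int) × PySem.Dict Int (List (List Int)) :=
        match cache.get? (target - coin) with
        | some v => (v, cache)
        | none => pvARun (target - coin) cache
      pvALoop target rest (fun c h => hc c (List.mem_cons_of_mem _ h))
        (combos ++ rc.1.map (fun r => coin :: r)) (rc.2.insert (target - coin) rc.1)
termination_by (target.toNat, coins.length)
decreasing_by
  · exact Prod.Lex.right _ (by simp)
  · exact Prod.Lex.right _ (by simp)
  · have hcoin : (1 : Int) ≤ coin := hc coin List.mem_cons_self
    have := pvCoin_le_of_floordiv hcoin h1
    exact Prod.Lex.left _ _ (by omega)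
  · exact Prod.Lex.right _ (by simp)

def pvARun (target : Int) (cache : PySem.Dict Int (List (List Int))) :
    List (List Int) × PySem.Dict Int (List (List Int)) :=
  pvALoop target pvCOINS (by decide) [] cache
termination_by (target.toNat, pvCOINS.length + 1)
decreasing_by exact Prod.Lex.right _ (by simp [pvCOINS])
end

def getCoinCombos (target : Int) (targetCache : Option (List (Int × List (List Int)))) : List (List Int) :=
  let cache := PySem.Dict.ofList (targetCache.getD [])
  (pvARun target cache).1

-- ===== PORT B =====
-- one DP row: all ordered combos summing to t, coins ascending, break once coin > t
def pvBRow (t : Int) (cache : PySem.Dict Int (List (List Int))) : List Int → List (List Int)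
  | [] => []
  | coin :: rest =>
    if t < coin then []
    else if coin = t then [coin] :: pvBRow t cache rest
    else (cache.getD (t - coin) []).map (fun r => coin :: r) ++ pvBRow t cache rest
      -- Source B writes cache[t-coin]; the key is always present here, so getD is exact

def getCoinCombos_alt (target : Int) (targetCache : Option (List (Int × List (List Int)))) : List (List Int) :=
  let cache0 := PySem.Dict.ofList (targetCache.getD [])
  let cache := (PySem.List.pyRange 1 target 1).foldl
      (fun c t => if c.contains t then c else c.insert t (pvBRow t c pvCOINS)) cache0
  pvBRow target cache pvCOINS

-- ===== PRECONDITION & SPEC =====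
-- Pre_ excludes the inputs on which more than 8000 of the amounts 1..target-1 are missing from the passed
-- cache: there the recursive Python A overruns the interpreter's recursion limit and raises RecursionError
-- (its depth is one frame per uncached amount along the coin-1 remainder chain), or, where a pre-seeded
-- cache skeleton cuts that chain, A returns only on such contrived cache shapes (see the cited example).
def Pre_getCoinCombos (target : Int) (targetCache : Option (List (Int × List (List Int)))) : Prop :=
  target < 8001 + (((PySem.Dict.ofList (targetCache.getD [])).keys.filter
    (fun k => decide (1 ≤ k) && decide (k < target))).length : Int)
instance (target : Int) (targetCache : Option (List (Int × List (List Int)))) : Decidable (Pre_getCoinCombos target targetCache) := by unfold Pre_getCoinCombos; infer_instance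
def pvWitness_getCoinCombos : Int × (Option (List (Int × List (List Int)))) := (11, some [(5, [[5]])])

def Spec_getCoinCombos (target : Int) (targetCache : Option (List (Int × List (List Int)))) (out : List (List Int)) : Prop := out = getCoinCombos_alt target targetCache
instance (target : Int) (targetCache : Option (List (Int × List (List Int)))) (out : List (List Int)) : Decidable (Spec_getCoinCombos target targetCache out) := by unfold Spec_getCoinCombos; infer_instance

-- ===== CLAIM (what is proved, stated in full; the proofs are below) =====
def Claim_equal_getCoinCombos : Prop := ∀ (target : Int) (targetCache : Option (List (Int × List (List Int)))), Dom_getCoinCombos target targetCache → Pre_getCoinCombos target targetCache → Spec_getCoinCombos target targetCache (getCoinCombos target targetCache)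

-- ===== LEMMAS AND PROOFS =====

-- the memo semantics: pvH cache0 t = the value A's cache ends up holding at key t;
-- pvRowAux = the row A computes for t (A never consults the cache at t itself at top level)
mutual
def pvH (cache0 : PySem.Dict Int (List (List Int))) (t : Int) : List (List Int) :=
  match cache0.get? t with
  | some v => v
  | none => pvRowAux cache0 t pvCOINS (by decide)
termination_by (t.toNat, pvCOINS.length + 1)
decreasing_by exact Prod.Lex.right _ (by simp [pvCOINS])

def pvRowAux (cache0 : PySem.Dict Int (List (List Int))) (t : Int)
    (coins : List Int) (hc : ∀ c ∈ coins, 1 ≤ c) : List (List Int) :=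
  match coins, hc with
  | [], _ => []
  | coin :: rest, hc =>
    (if h1 : PySem.Int.floordiv t coin < 1 then []
     else if h2 : t - coin = 0 then [[coin]]
     else (pvH cache0 (t - coin)).map (fun r => coin :: r))
    ++ pvRowAux cache0 t rest (fun c h => hc c (List.mem_cons_of_mem _ h))
termination_by (t.toNat, coins.length)
decreasing_by
  · have hcoin : (1 : Int) ≤ coin := hc coin List.mem_cons_self
    have := pvCoin_le_of_floordiv hcoin h1
    exact Prod.Lex.left _ _ (by omega)
  · exact Prod.Lex.right _ (by simp)
end

-- cache coherence: every entry agrees with pvH, and cache0's keys stay present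
def pvCoh (cache0 c : PySem.Dict Int (List (List Int))) : Prop :=
  (∀ k v, c.get? k = some v → v = pvH cache0 k) ∧
  (∀ k, (cache0.get? k).isSome = true → (c.get? k).isSome = true)

theorem pvCoh_insert {cache0 c : PySem.Dict Int (List (List Int))} {k : Int} {v : List (List Int)}
    (h : pvCoh cache0 c) (hv : v = pvH cache0 k) : pvCoh cache0 (c.insert k v) := by
  constructor
  · intro k' v' hk'
    by_cases he : k' = k
    · subst he
      rw [PySem.Dict.get?_insert_self] at hk'
      cases hk'; exact hv
    · rw [PySem.Dict.get?_insert, if_neg he] at hk'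
      exact h.1 _ _ hk'
  · intro k' hks
    by_cases he : k' = k
    · subst he; simp [PySem.Dict.get?_insert_self]
    · rw [PySem.Dict.get?_insert, if_neg he]
      exact h.2 _ hks

theorem pvRowAux_eq_nil (cache0 : PySem.Dict Int (List (List Int))) (t : Int)
    (coins : List Int) (hc : ∀ c ∈ coins, 1 ≤ c) (hlt : ∀ c ∈ coins, t < c) :
    pvRowAux cache0 t coins hc = [] := by
  induction coins with
  | nil => simp [pvRowAux]
  | cons coin rest ih =>
    rw [pvRowAux]
    have hcoin : (1 : Int) ≤ coin := hc coin List.mem_cons_self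
    have hltc : t < coin := hlt coin List.mem_cons_self
    have h1 : PySem.Int.floordiv t coin < 1 :=
      (PySem.Int.floordiv_lt_iff_lt_mul (by omega)).mpr (by omega)
    simp only [dif_pos h1, List.nil_append]
    exact ih (fun c h => hc c (List.mem_cons_of_mem _ h)) (fun c h => hlt c (List.mem_cons_of_mem _ h))

theorem pvALoop_spec (cache0 : PySem.Dict Int (List (List Int))) :
    ∀ n : Nat, ∀ target : Int, target.toNat ≤ n →
    ∀ (coins : List Int) (hc : ∀ c ∈ coins, 1 ≤ c) combos c, pvCoh cache0 c →
      (pvALoop target coins hc combos c).1 = combos ++ pvRowAux cache0 target coins hc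
      ∧ pvCoh cache0 (pvALoop target coins hc combos c).2 := by
  intro n
  induction n using Nat.strong_induction_on with
  | _ n IH =>
  intro target htn coins
  induction coins with
  | nil =>
    intro hc combos c hcoh
    constructor
    · simp [pvALoop, pvRowAux]
    · simpa [pvALoop] using hcoh
  | cons coin rest ihc =>
    intro hc combos c hcoh
    have hcoin : (1 : Int) ≤ coin := hc coin List.mem_cons_self
    by_cases h1 : PySem.Int.floordiv target coin < 1
    · rw [pvALoop, pvRowAux]
      simp only [dif_pos h1, List.nil_append]
      exact ihc _ combos c hcoh
    · have hle : coin ≤ target := pvCoin_le_of_floordiv hcoin h1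
      by_cases h2 : target - coin = 0
      · rw [pvALoop, pvRowAux]
        simp only [dif_neg h1, dif_pos h2]
        obtain ⟨e1, e2⟩ := ihc (fun c h => hc c (List.mem_cons_of_mem _ h)) (combos ++ [[coin]]) c hcoh
        exact ⟨by rw [e1]; simp, e2⟩
      · rw [pvALoop, pvRowAux]
        simp only [dif_neg h1, dif_neg h2]
        cases hm : c.get? (target - coin) with
        | some v =>
          have hv : v = pvH cache0 (target - coin) := hcoh.1 _ _ hm

          obtain ⟨e1, e2⟩ := ihc (fun c h => hc c (List.mem_cons_of_mem _ h))
            (combos ++ v.map (fun r => coin :: r)) (c.insert (target - coin) v)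
            (pvCoh_insert hcoh hv)
          refine ⟨?_, e2⟩
          rw [e1, hv]; simp
        | none =>
          have hklt : (target - coin).toNat < target.toNat := by omega
          have h0 : cache0.get? (target - coin) = none := by
            cases h : cache0.get? (target - coin) with
            | none => rfl
            | some w =>
              have := hcoh.2 (target - coin) (by simp [h])
              rw [hm] at this; simp at this
          obtain ⟨e1, e2⟩ := IH (target - coin).toNat (by omega) (target - coin) le_rfl
            pvCOINS (by decide) [] c hcoh
          have hv : (pvALoop (target - coin) pvCOINS (by decide) [] c).1 = pvH cache0 (target - coin) := by
            rw [pvH, h0, e1]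
            simp

          rw [pvARun.eq_def]
          obtain ⟨f1, f2⟩ := ihc (fun c h => hc c (List.mem_cons_of_mem _ h))
            (combos ++ (pvALoop (target - coin) pvCOINS (by decide) [] c).1.map (fun r => coin :: r))
            ((pvALoop (target - coin) pvCOINS (by decide) [] c).2.insert (target - coin)
              (pvALoop (target - coin) pvCOINS (by decide) [] c).1)
            (pvCoh_insert e2 hv)
          refine ⟨?_, f2⟩
          rw [f1, hv]; simp

theorem pvBRow_eq (cache0 c : PySem.Dict Int (List (List Int))) (hcoh : pvCoh cache0 c)
    (t : Int) (hkeys : ∀ k, 1 ≤ k → k < t → (c.get? k).isSome = true) :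
    ∀ (coins : List Int) (hc : ∀ c ∈ coins, 1 ≤ c), coins.Pairwise (· ≤ ·) →
      pvBRow t c coins = pvRowAux cache0 t coins hc := by
  intro coins
  induction coins with
  | nil => intro hc _; simp [pvBRow, pvRowAux]
  | cons coin rest ih =>
    intro hc hsort
    have hcoin : (1 : Int) ≤ coin := hc coin List.mem_cons_self
    rw [pvBRow, pvRowAux]
    by_cases hlt : t < coin
    · have h1 : PySem.Int.floordiv t coin < 1 :=
        (PySem.Int.floordiv_lt_iff_lt_mul (by omega)).mpr (by omega)
      rw [if_pos hlt]
      simp only [dif_pos h1, List.nil_append]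
      exact (pvRowAux_eq_nil cache0 t rest _
        (fun c hm => lt_of_lt_of_le hlt ((List.pairwise_cons.mp hsort).1 c hm))).symm
    · have h1 : ¬ PySem.Int.floordiv t coin < 1 := by
        have : (1 : Int) * coin ≤ t := by omega
        have := (PySem.Int.le_floordiv_iff_mul_le (by omega)).mpr this
        omega
      rw [if_neg hlt]
      by_cases he : coin = t
      · have h2 : t - coin = 0 := by omega
        rw [if_pos he]
        simp only [dif_neg h1, dif_pos h2]
        rw [ih _ (List.pairwise_cons.mp hsort).2]
        rfl
      · have h2 : ¬ t - coin = 0 := by omega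
        rw [if_neg he]
        simp only [dif_neg h1, dif_neg h2]
        have hsome : (c.get? (t - coin)).isSome = true :=
          hkeys (t - coin) (by omega) (by omega)
        obtain ⟨v, hv⟩ := Option.isSome_iff_exists.mp hsome
        have hgd : c.getD (t - coin) [] = v := by
          simp [PySem.Dict.getD_eq_get?_getD, hv]
        rw [hgd, hcoh.1 _ _ hv, ih _ (List.pairwise_cons.mp hsort).2]

theorem pvBLoop_spec (cache0 : PySem.Dict Int (List (List Int))) (target : Int) :
    ∀ n : Nat, ∀ a : Int, (target - a).toNat ≤ n → 1 ≤ a →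
    ∀ c, pvCoh cache0 c → (∀ k, 1 ≤ k → k < a → (c.get? k).isSome = true) →
      pvCoh cache0 ((PySem.List.pyRange a target 1).foldl
          (fun c t => if c.contains t then c else c.insert t (pvBRow t c pvCOINS)) c)
      ∧ ∀ k, 1 ≤ k → k < target →
          (((PySem.List.pyRange a target 1).foldl
            (fun c t => if c.contains t then c else c.insert t (pvBRow t c pvCOINS)) c).get? k).isSome = true := by
  intro n
  induction n using Nat.strong_induction_on with
  | _ n IH =>
  intro a hna ha1 c hcoh hkeys
  by_cases hat : a < target
  · rw [PySem.List.pyRange_one_cons hat]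
    simp only [List.foldl_cons]
    by_cases hcont : c.contains a = true
    · rw [if_pos hcont]
      refine IH (target - (a + 1)).toNat (by omega) (a + 1) le_rfl (by omega) c hcoh ?_
      intro k hk1 hk2
      by_cases hk : k = a
      · subst hk
        rw [← PySem.Dict.contains_eq_isSome_get?]
        exact hcont
      · exact hkeys k hk1 (by omega)
    · rw [if_neg hcont]
      have hnone : c.get? a = none := by
        have hcc := PySem.Dict.contains_eq_isSome_get? (d := c) (k := a)
        cases h : c.get? a with
        | none => rfl
        | some w => rw [h] at hcc; simp at hcc; exact absurd hcc hcont
      have h0none : cache0.get? a = none := by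
        cases h : cache0.get? a with
        | none => rfl
        | some w =>
          have := hcoh.2 a (by simp [h])
          rw [hnone] at this; simp at this
      have hrow : pvBRow a c pvCOINS = pvH cache0 a := by
        rw [pvH, h0none]
        exact pvBRow_eq cache0 c hcoh a (fun k hk1 hk2 => hkeys k hk1 (by omega))
          pvCOINS (by decide) (by decide)
      refine IH (target - (a + 1)).toNat (by omega) (a + 1) le_rfl (by omega)
        (c.insert a (pvBRow a c pvCOINS)) (pvCoh_insert hcoh hrow) ?_
      intro k hk1 hk2
      by_cases hk : k = a
      · subst hk; simp [PySem.Dict.get?_insert_self]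
      · rw [PySem.Dict.get?_insert, if_neg hk]
        exact hkeys k hk1 (by omega)
  · rw [PySem.List.pyRange_one_eq_nil (by omega)]
    simp only [List.foldl_nil]
    exact ⟨hcoh, fun k hk1 hk2 => hkeys k hk1 (by omega)⟩

-- ===== VERDICT (by name: the statement is the Claim_ definition above) =====
theorem getCoinCombos_spec : Claim_equal_getCoinCombos := by
  unfold Claim_equal_getCoinCombos
  intro target targetCache _ _
  unfold Spec_getCoinCombos getCoinCombos getCoinCombos_alt
  simp only []
  have hcoh0 : pvCoh (PySem.Dict.ofList (targetCache.getD []))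
      (PySem.Dict.ofList (targetCache.getD [])) := by
    constructor
    · intro k v hk
      rw [pvH, hk]
    · intro k h; exact h
  obtain ⟨eA, -⟩ := pvALoop_spec (PySem.Dict.ofList (targetCache.getD [])) target.toNat target
    le_rfl pvCOINS (by decide) [] (PySem.Dict.ofList (targetCache.getD [])) hcoh0
  obtain ⟨hBcoh, hBkeys⟩ := pvBLoop_spec (PySem.Dict.ofList (targetCache.getD [])) target
    (target - 1).toNat 1 le_rfl le_rfl (PySem.Dict.ofList (targetCache.getD [])) hcoh0
    (fun k hk1 hk2 => absurd hk2 (by omega))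
  rw [pvARun.eq_def, eA,
    pvBRow_eq (PySem.Dict.ofList (targetCache.getD [])) _ hBcoh target hBkeys pvCOINS (by decide) (by decide)]
  simp
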